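-- pv_equiv track=rewrite | github.com/Julian-barkoudeh/Tutti | TP7.py | simplification0
-- ===== SOURCE A (Python) =====
-- def simplification0(exp):
--     somme = 0
--     expNew = ""
--     action = "+" # variable pour savoir le sign de la variable
--     cpt = 0 #Variable pour savoir la position de l'inconnu dans la nouvelle expression
--     for caractere in exp:
--         if (caractere.isdigit()): #Il s'agit d'un nombre entier
--             if(action == "+") :
--                 somme += int(caractere)
--             else :
--                 somme -= int(caractere)
--         elif (caractere == "+" or caractere == "-") : #Il s'agit des symboles + ou -
--             action = caractere
--         else : #Il s'agit des inconnus x et y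
--             if cpt == 0 :
--                 expNew += caractere
--             else :
--                 expNew += action + caractere
--             cpt +=1
--     if(somme >0):
--         expNew += "+" + str(somme)
--     else :
--          expNew += str(somme)
--     return expNew
-- ===== SOURCE B (Python) =====
-- def simplification0(exp):
--     # Right-to-left scan: buffer characters until the sign that governs them
--     # (the nearest '+'/'-' to their left) is reached, then flush the group.
--     somme = 0
--     unk = []            # final (sign, char) list, built back-to-front
--     pend = []           # chars seen since the last flush, rightmost-first
--
--     def flush(sign):
--         nonlocal somme, unk, pend
--         group = []
--         for c in pend:
--             if c.isdigit():
--                 somme += sign * int(c)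
--             else:
--                 group.append((sign, c))
--         group.reverse()
--         unk = group + unk
--         pend = []
--
--     for c in reversed(exp):
--         if c == "+" or c == "-":
--             flush(1 if c == "+" else -1)
--         else:
--             pend.append(c)
--     flush(1)
--
--     expNew = "".join(c if i == 0 else ("+" if s > 0 else "-") + c
--                      for i, (s, c) in enumerate(unk))
--     return expNew + ("+" + str(somme) if somme > 0 else str(somme))
-- ===== Notes on version B (the rewrite author's own statement) =====
-- stated objective: alternative
-- what changed: Replaces A's left-to-right scan with a running sign flag by a right-to-left scan with no running sign: characters are buffered until the '+'/'-' that governs them (the nearest sign to their left) is reached, then the whole group is flushed at once with that sign, the output being assembled back-to-front.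
import Mathlib
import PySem

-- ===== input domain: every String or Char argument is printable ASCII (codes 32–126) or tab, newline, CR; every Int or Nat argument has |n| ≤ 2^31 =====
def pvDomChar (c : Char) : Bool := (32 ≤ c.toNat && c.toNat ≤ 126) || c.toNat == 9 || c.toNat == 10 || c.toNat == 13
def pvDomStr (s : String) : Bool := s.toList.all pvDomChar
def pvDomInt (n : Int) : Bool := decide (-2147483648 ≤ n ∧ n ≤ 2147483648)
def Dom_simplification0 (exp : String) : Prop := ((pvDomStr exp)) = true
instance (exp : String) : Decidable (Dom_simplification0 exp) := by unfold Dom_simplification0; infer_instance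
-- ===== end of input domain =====

-- B replaces A's left-to-right scan with a running sign flag by a right-to-left scan that
-- buffers characters until the sign governing them is reached, then flushes the group at once
-- (objective: alternative algorithm/traversal order, same cost).


-- ===== PORT A =====
-- Python's one-char string `action` is carried as a Char; int(caractere) is
-- PySem.Int.ofChars? [c] (guarded by isdigit, so the getD 0 default is never used).
def stepA (st : Int × List Char × Char × Nat) (c : Char) : Int × List Char × Char × Nat :=
  let (somme, expNew, action, cpt) := st
  if PySem.Chars.isdigit c then
    if action == '+' then (somme + (PySem.Int.ofChars? [c]).getD 0, expNew, action, cpt)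
    else (somme - (PySem.Int.ofChars? [c]).getD 0, expNew, action, cpt)
  else if c == '+' || c == '-' then
    (somme, expNew, c, cpt)
  else
    if cpt == 0 then (somme, expNew ++ [c], action, cpt + 1)
    else (somme, expNew ++ [action, c], action, cpt + 1)

def simplification0 (exp : String) : String :=
  let st := exp.toList.foldl stepA (0, [], '+', 0)
  let somme := st.1
  let expNew := st.2.1
  String.ofList (if somme > 0 then expNew ++ '+' :: PySem.Int.toChars somme
             else expNew ++ PySem.Int.toChars somme)

-- ===== PORT B =====
-- flush(sign): walk the pending buffer (rightmost-first), add signed digits to somme,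
-- collect the unknowns, reverse them back to source order and prepend to unk.
def flushB (sign : Int) (somme : Int) (unk : List (Int × Char)) (pend : List Char) :
    Int × List (Int × Char) :=
  let st := pend.foldl (fun (p : Int × List (Int × Char)) c =>
      if PySem.Chars.isdigit c then (p.1 + sign * (PySem.Int.ofChars? [c]).getD 0, p.2)
      else (p.1, p.2 ++ [(sign, c)])) (somme, [])
  (st.1, st.2.reverse ++ unk)

def stepB (st : Int × List (Int × Char) × List Char) (c : Char) :
    Int × List (Int × Char) × List Char :=
  if c == '+' || c == '-' then
    let f := flushB (if c == '+' then 1 else -1) st.1 st.2.1 st.2.2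
    (f.1, f.2, [])
  else
    (st.1, st.2.1, st.2.2 ++ [c])

def renderB (unk : List (Int × Char)) : List Char :=
  ((PySem.List.enumerate unk).map
    (fun p => if p.1 == 0 then [p.2.2] else [(if p.2.1 > 0 then '+' else '-'), p.2.2])).flatten

def simplification0_alt (exp : String) : String :=
  let st := exp.toList.reverse.foldl stepB (0, [], [])
  let f := flushB 1 st.1 st.2.1 st.2.2
  String.ofList (renderB f.2 ++ (if f.1 > 0 then '+' :: PySem.Int.toChars f.1
                                 else PySem.Int.toChars f.1))

-- ===== PRECONDITION & SPEC =====
def Spec_simplification0 (exp : String) (out : String) : Prop := out = simplification0_alt exp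
instance (exp : String) (out : String) : Decidable (Spec_simplification0 exp out) := by unfold Spec_simplification0; infer_instance

-- ===== CLAIM (what is proved, stated in full; the proofs are below) =====
def Claim_equal_simplification0 : Prop := ∀ (exp : String), Dom_simplification0 exp → Spec_simplification0 exp (simplification0 exp)

-- ===== LEMMAS AND PROOFS =====

-- character classes and per-character value
def isSign (c : Char) : Bool := c == '+' || c == '-'
def valC (c : Char) : Int := (PySem.Int.ofChars? [c]).getD 0

-- reference semantics: signed digit sum / signed unknown list of a tail, given current sign
def sumSpec : List Char → Int → Int
  | [], _ => 0
  | c :: cs, s =>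
    if PySem.Chars.isdigit c then s * valC c + sumSpec cs s
    else if c = '+' then sumSpec cs 1
    else if c = '-' then sumSpec cs (-1)
    else sumSpec cs s

def unkSpec : List Char → Int → List (Int × Char)
  | [], _ => []
  | c :: cs, s =>
    if PySem.Chars.isdigit c then unkSpec cs s
    else if c = '+' then unkSpec cs 1
    else if c = '-' then unkSpec cs (-1)
    else (s, c) :: unkSpec cs s

-- digit sum / signed unknowns of a sign-free segment
def dsum (l : List Char) : Int :=
  ((l.filter (fun c => PySem.Chars.isdigit c)).map valC).sum

def umap (s : Int) (l : List Char) : List (Int × Char) :=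
  (l.filter (fun c => ¬ PySem.Chars.isdigit c)).map (fun c => (s, c))

lemma renderB_append_one (u : List (Int × Char)) (s : Int) (c : Char) :
    renderB (u ++ [(s, c)]) =
      renderB u ++ (if u.length = 0 then [c] else [(if s > 0 then '+' else '-'), c]) := by
  cases u with
  | nil => simp [renderB, PySem.List.enumerate_cons, PySem.List.enumerate_nil]
  | cons x xs =>
    simp [renderB, PySem.List.enumerate_append, PySem.List.enumerate_cons]
    omega

-- A-side invariant: the forward loop realises sumSpec / unkSpec
lemma loopA_inv (cs : List Char) (somme : Int) (s : Int) (U : List (Int × Char))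
    (hs : s = 1 ∨ s = -1) :
    (cs.foldl stepA (somme, renderB U, (if s == 1 then '+' else '-'), U.length)).1
      = somme + sumSpec cs s ∧
    (cs.foldl stepA (somme, renderB U, (if s == 1 then '+' else '-'), U.length)).2.1
      = renderB (U ++ unkSpec cs s) := by
  induction cs generalizing somme s U with
  | nil => simp [sumSpec, unkSpec]
  | cons c cs ih =>
    by_cases hd : PySem.Chars.isdigit c = true
    · have hpm : c ≠ '+' ∧ c ≠ '-' := by
        constructor <;> rintro rfl <;> simp [PySem.Chars.isdigit] at hd
      rcases hs with h | h <;>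
        simpa [stepA, sumSpec, unkSpec, hd, hpm.1, hpm.2, h, valC, add_assoc,
               sub_eq_add_neg, neg_mul, one_mul] using
          ih (somme + (if s == 1 then 1 else -1) * valC c) s U (by omega)
    · by_cases hp : c = '+'
      · simpa [stepA, stepB, sumSpec, unkSpec, hd, hp] using ih somme 1 U (Or.inl rfl)
      · by_cases hm : c = '-'
        · simpa [stepA, stepB, sumSpec, unkSpec, hd, hp, hm] using
            ih somme (-1) U (Or.inr rfl)
        · have := ih somme s (U ++ [(s, c)]) hs
          rw [renderB_append_one] at this
          by_cases hz : U.length = 0 <;>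
            rcases hs with h | h <;>
              simpa [stepA, sumSpec, unkSpec, hd, hp, hm, hz, h, List.append_assoc] using this

-- flushB computes somme + s * dsum and prepends the reversed unknowns
lemma flushB_foldl (s : Int) (pend : List Char) (somme : Int) (g : List (Int × Char)) :
    pend.foldl (fun (p : Int × List (Int × Char)) c =>
      if PySem.Chars.isdigit c then (p.1 + s * (PySem.Int.ofChars? [c]).getD 0, p.2)
      else (p.1, p.2 ++ [(s, c)])) (somme, g)
      = (somme + s * dsum pend, g ++ umap s pend) := by
  induction pend generalizing somme g with
  | nil => simp [dsum, umap]
  | cons c cs ih =>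
    by_cases hd : PySem.Chars.isdigit c = true <;>
      simp [hd, ih, dsum, umap, valC, mul_add, add_assoc]

lemma dsum_reverse (l : List Char) : dsum l.reverse = dsum l := by
  simp [dsum, List.filter_reverse, List.map_reverse, List.sum_reverse]

lemma umap_reverse (s : Int) (l : List Char) : umap s l.reverse = (umap s l).reverse := by
  simp [umap, List.filter_reverse, List.map_reverse]

lemma flushB_spec (s somme : Int) (unk : List (Int × Char)) (pre : List Char) :
    flushB s somme unk pre.reverse = (somme + s * dsum pre, umap s pre ++ unk) := by
  unfold flushB
  rw [flushB_foldl]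
  simp [dsum_reverse, umap_reverse]

-- decomposition of sumSpec / unkSpec at the first sign character
lemma spec_split (cs : List Char) (s : Int) :
    sumSpec cs s = s * dsum (cs.takeWhile (fun c => !isSign c))
        + sumSpec (cs.dropWhile (fun c => !isSign c)) 1 ∧
    unkSpec cs s = umap s (cs.takeWhile (fun c => !isSign c))
        ++ unkSpec (cs.dropWhile (fun c => !isSign c)) 1 := by
  induction cs generalizing s with
  | nil => simp [sumSpec, unkSpec, dsum, umap]
  | cons c cs ih =>
    by_cases hp : c = '+'
    · subst hp; simp [sumSpec, unkSpec, isSign, dsum, umap, List.takeWhile, List.dropWhile,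
          (by decide : PySem.Chars.isdigit '+' = false)]
    · by_cases hm : c = '-'
      · subst hm; simp [sumSpec, unkSpec, isSign, dsum, umap, List.takeWhile, List.dropWhile,
          (by decide : PySem.Chars.isdigit '-' = false)]
      · have hns : isSign c = false := by simp [isSign, hp, hm]
        by_cases hd : PySem.Chars.isdigit c = true
        · have hdig : c ≠ '+' ∧ c ≠ '-' := ⟨hp, hm⟩
          rcases ih s with ⟨h1, h2⟩
          constructor
          · simp [sumSpec, hd, hp, hm, List.takeWhile_cons, List.dropWhile_cons, hns,
                  dsum, valC, h1, mul_add]; ring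
          · simp [unkSpec, hd, hp, hm, List.takeWhile_cons, List.dropWhile_cons, hns,
                  umap, h2]
        · rcases ih s with ⟨h1, h2⟩
          constructor
          · simp [sumSpec, hd, hp, hm, List.takeWhile_cons, List.dropWhile_cons, hns,
                  dsum, h1]
          · simp [unkSpec, hd, hp, hm, List.takeWhile_cons, List.dropWhile_cons, hns,
                  umap, h2]

-- sumSpec / unkSpec of a tail starting with a sign ignore the incoming sign
-- B-side invariant: the backward loop (as a foldr) leaves exactly the prefix before the
-- first sign pending, and has already realised the tail from the first sign on
lemma loopB_inv (cs : List Char) :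
    cs.foldr (fun c st => stepB st c) (0, ([], [])) =
      (sumSpec (cs.dropWhile (fun c => !isSign c)) 1,
       unkSpec (cs.dropWhile (fun c => !isSign c)) 1,
       (cs.takeWhile (fun c => !isSign c)).reverse) := by
  induction cs with
  | nil => simp [sumSpec, unkSpec]
  | cons c cs ih =>
    by_cases hp : c = '+'
    · subst hp
      rw [List.foldr_cons, ih]
      have h := spec_split cs 1
      simp [stepB, flushB_spec, sumSpec, unkSpec, List.dropWhile_cons, List.takeWhile_cons,
        (by decide : isSign '+' = true), (by decide : PySem.Chars.isdigit '+' = false),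
        h.1, h.2, add_comm]
    · by_cases hm : c = '-'
      · subst hm
        rw [List.foldr_cons, ih]
        have h := spec_split cs (-1)
        simp [stepB, flushB_spec, sumSpec, unkSpec, List.dropWhile_cons, List.takeWhile_cons,
          (by decide : isSign '-' = true), (by decide : PySem.Chars.isdigit '-' = false),
          h.1, h.2, add_comm]
      · have hns : isSign c = false := by simp [isSign, hp, hm]
        rw [List.foldr_cons, ih]
        simp [stepB, hp, hm, hns, List.dropWhile_cons, List.takeWhile_cons]

lemma renderB_nil : renderB [] = [] := by
  simp [renderB, PySem.List.enumerate_nil]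

-- ===== VERDICT (by name: the statement is the Claim_ definition above) =====
theorem simplification0_spec : Claim_equal_simplification0 := by
  intro exp _
  unfold Spec_simplification0 simplification0 simplification0_alt
  have hA := loopA_inv exp.toList 0 1 [] (Or.inl rfl)
  simp only [List.length_nil, beq_self_eq_true, if_pos, renderB_nil, List.nil_append,
    zero_add] at hA
  simp only [List.foldl_reverse]
  rw [loopB_inv]
  simp only [flushB_spec]
  rw [hA.1, hA.2]
  have hsplit := spec_split exp.toList 1
  have hs1 : sumSpec exp.toList 1
      = sumSpec (exp.toList.dropWhile (fun c => !isSign c)) 1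
        + dsum (exp.toList.takeWhile (fun c => !isSign c)) := by
    rw [hsplit.1]; ring
  rw [hs1, ← hsplit.2]
  by_cases hpos : 0 < sumSpec (exp.toList.dropWhile (fun c => !isSign c)) 1
      + dsum (exp.toList.takeWhile (fun c => !isSign c)) <;>
    simp [hpos, String.ofList_append]
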